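-- pv_equiv track=rewrite | github.com/E1psycongr00/Algorithm_study | 임현규/programmers/Lv2/lv2_할인행사_하.py | solution
-- ===== SOURCE A (Python) =====
-- from collections import Counter
--
-- def solution(want, number, discount):
--     counter = Counter()
--     for i in range(len(want)):
--         counter[want[i]] = number[i]
--
--     cnt = 0
--     for i in range(len(discount) - 10 + 1):
--         if counter == Counter(discount[i: 10 + i]):
--             cnt += 1
--     return cnt
-- ===== SOURCE B (Python) =====
-- def solution(want, number, discount):
--     # Sliding window: keep item counts of the current 10-item window and the
--     # number of keys disagreeing with the target, updated in O(1) per step.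
--     target = dict(zip(want, number))
--     n = len(discount)
--     if n < 10:
--         return 0
--     window = {}
--     for item in discount[:10]:
--         window[item] = window.get(item, 0) + 1
--     keys = set(want) | set(discount)
--     bad = 0
--     for k in keys:
--         if window.get(k, 0) != target.get(k, 0):
--             bad += 1
--     cnt = 0
--     for i in range(n - 10 + 1):
--         if bad == 0:
--             cnt += 1
--         if i + 10 < n:
--             o = discount[i]
--             if window.get(o, 0) == target.get(o, 0):
--                 bad += 1
--             window[o] = window.get(o, 0) - 1
--             if window.get(o, 0) == target.get(o, 0):
--                 bad -= 1
--             e = discount[i + 10]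
--             if window.get(e, 0) == target.get(e, 0):
--                 bad += 1
--             window[e] = window.get(e, 0) + 1
--             if window.get(e, 0) == target.get(e, 0):
--                 bad -= 1
--     return cnt
-- ===== Notes on version B (the rewrite author's own statement) =====
-- stated objective: faster
-- what changed: Instead of rebuilding a Counter of each 10-item slice and comparing whole dicts per window, B slides a single window: it maintains the window's item counts and a running count of keys disagreeing with the target, updating both in O(1) when one item leaves and one enters.
import Mathlib
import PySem

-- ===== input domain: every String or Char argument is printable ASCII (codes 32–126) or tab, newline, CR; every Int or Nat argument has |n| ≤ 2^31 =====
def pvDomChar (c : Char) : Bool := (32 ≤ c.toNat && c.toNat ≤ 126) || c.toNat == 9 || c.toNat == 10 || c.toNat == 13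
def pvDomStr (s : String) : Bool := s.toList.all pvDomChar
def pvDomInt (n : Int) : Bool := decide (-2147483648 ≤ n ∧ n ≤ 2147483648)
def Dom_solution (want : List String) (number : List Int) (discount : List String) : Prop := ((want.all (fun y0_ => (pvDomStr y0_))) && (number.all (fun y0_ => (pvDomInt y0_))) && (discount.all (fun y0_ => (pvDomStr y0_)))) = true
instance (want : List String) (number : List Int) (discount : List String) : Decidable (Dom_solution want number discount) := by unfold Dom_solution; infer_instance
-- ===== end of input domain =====

-- B replaces the per-window Counter rebuild + dict comparison by one sliding window
-- (window counts and a running mismatch counter updated in O(1) per step); return-value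
-- equivalence is proved on inputs with len(want) ≤ len(number) (elsewhere A raises).

-- ===== PORT A =====
-- Python ≥3.10 Counter equality: counts compared key by key, a missing key counting as 0.
def counterEqPy (c d : PySem.Dict String Int) : Bool :=
  (c.keys ++ d.keys).all (fun k => c.getD k 0 == d.getD k 0)

def solution (want : List String) (number : List Int) (discount : List String) : Int :=
  let counter := (PySem.List.pyRange 0 (want.length : Int)).foldl
    (fun c i => c.insert (PySem.List.pyGetD want i "") (PySem.List.pyGetD number i 0))
    PySem.Dict.empty
  (PySem.List.pyRange 0 ((discount.length : Int) - 10 + 1)).foldl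
    (fun cnt i =>
      if counterEqPy counter
          (PySem.Dict.counter (PySem.List.slice discount (some i) (some (10 + i)))) then
        cnt + 1
      else cnt) 0

-- ===== PORT B =====
-- target = dict(zip(want, number))
def altTarget (want : List String) (number : List Int) : PySem.Dict String Int :=
  (want.zip number).foldl (fun d p => d.insert p.1 p.2) PySem.Dict.empty

-- body of B's 'for i in range(n - 10 + 1)' loop, state (window, bad, cnt)
def altStep (target : PySem.Dict String Int) (n : Int) (discount : List String)
    (s : PySem.Dict String Int × Int × Int) (i : Int) : PySem.Dict String Int × Int × Int :=
  let w := s.1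
  let bad := s.2.1
  let cnt := if bad = 0 then s.2.2 + 1 else s.2.2
  if i + 10 < n then
    let o := PySem.List.pyGetD discount i ""
    let bad := if w.getD o 0 == target.getD o 0 then bad + 1 else bad
    let w := w.insert o (w.getD o 0 - 1)
    let bad := if w.getD o 0 == target.getD o 0 then bad - 1 else bad
    let e := PySem.List.pyGetD discount (i + 10) ""
    let bad := if w.getD e 0 == target.getD e 0 then bad + 1 else bad
    let w := w.insert e (w.getD e 0 + 1)
    let bad := if w.getD e 0 == target.getD e 0 then bad - 1 else bad
    (w, bad, cnt)
  else (w, bad, cnt)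

def solution_alt (want : List String) (number : List Int) (discount : List String) : Int :=
  let target := altTarget want number
  let n : Int := (discount.length : Int)
  if n < 10 then 0
  else
    let window := (PySem.List.slice discount none (some 10)).foldl
      (fun d x => d.insert x (d.getD x 0 + 1)) PySem.Dict.empty
    let keys := PySem.Set.union (PySem.Set.ofList want) (PySem.Set.ofList discount)
    let bad := keys.foldl
      (fun b k => if window.getD k 0 != target.getD k 0 then b + 1 else b) (0 : Int)
    let res := (PySem.List.pyRange 0 (n - 10 + 1)).foldl
      (altStep target n discount) (window, bad, 0)
    res.2.2

-- ===== PRECONDITION & SPEC =====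
-- A raises IndexError (number[i]) as soon as want is longer than number; nothing else raises.
def Pre_solution (want : List String) (number : List Int) (discount : List String) : Prop :=
  want.length ≤ number.length
instance (want : List String) (number : List Int) (discount : List String) :
    Decidable (Pre_solution want number discount) := by unfold Pre_solution; infer_instance

def pvWitness_solution : List String × List Int × List String :=
  (["a"], [10], ["a", "a", "a", "a", "a", "a", "a", "a", "a", "a"])

def Spec_solution (want : List String) (number : List Int) (discount : List String) (out : Int) : Prop :=
  out = solution_alt want number discount
instance (want : List String) (number : List Int) (discount : List String) (out : Int) :
    Decidable (Spec_solution want number discount out) := by unfold Spec_solution; infer_instance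

-- ===== CLAIM (what is proved, stated in full; the proofs are below) =====
def Claim_equal_solution : Prop := ∀ (want : List String) (number : List Int) (discount : List String), Dom_solution want number discount → Pre_solution want number discount → Spec_solution want number discount (solution want number discount)


-- ===== LEMMAS AND PROOFS =====

-- count of item k in the 10-item window starting at j
def wcnt (discount : List String) (j : Nat) (k : String) : Int :=
  (((discount.drop j).take 10).count k : Int)

-- target count of k (missing = 0)
def tval (want : List String) (number : List Int) (k : String) : Int :=
  (altTarget want number).getD k 0

-- the fixed key universe B scans once
def keysK (want discount : List String) : List String :=
  PySem.Set.union (PySem.Set.ofList want) (PySem.Set.ofList discount)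

-- number of keys on which window j disagrees with the target
def mism (want : List String) (number : List Int) (discount : List String) (j : Nat) : Nat :=
  (keysK want discount).countP (fun k => !(wcnt discount j k == tval want number k))

theorem contains_false_of_not_mem {κ ν : Type} [BEq κ] [LawfulBEq κ] (d : PySem.Dict κ ν) (k : κ)
    (h : k ∉ d.keys) : d.contains k = false := by
  cases hc : d.contains k
  · rfl
  · exact absurd ((PySem.Dict.contains_iff_mem_keys d k).mp hc) h

theorem counterEqPy_iff (c d : PySem.Dict String Int) :
    counterEqPy c d = true ↔ ∀ k, c.getD k 0 = d.getD k 0 := by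
  unfold counterEqPy
  rw [List.all_eq_true]
  constructor
  · intro h k
    by_cases hk : k ∈ c.keys ++ d.keys
    · simpa using h k hk
    · rw [List.mem_append] at hk
      push Not at hk
      rw [PySem.Dict.getD_of_not_contains _ _ (contains_false_of_not_mem c k hk.1),
          PySem.Dict.getD_of_not_contains _ _ (contains_false_of_not_mem d k hk.2)]
  · intro h k _
    simpa using h k

theorem altTarget_keys (want : List String) (number : List Int) :
    (altTarget want number).keys = PySem.Set.ofList ((want.zip number).map Prod.fst) := by
  unfold altTarget
  rw [PySem.Dict.keys_foldl_insert_key ((want.zip number)) Prod.fst (fun _ p => p.2)]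
  simp [PySem.Set.ofList_eq_foldl, PySem.Set.update, PySem.Dict.keys_empty]

theorem foldIdx (want : List String) (number : List Int) (d : PySem.Dict String Int)
    (h : want.length ≤ number.length) :
    (List.range want.length).foldl
      (fun c i => c.insert (want.getD i "") (number.getD i 0)) d
      = (want.zip number).foldl (fun d p => d.insert p.1 p.2) d := by
  induction want generalizing number d with
  | nil => simp
  | cons w ws ih =>
    match number, h with
    | m :: ms, h =>
      rw [List.length_cons, List.range_succ_eq_map]
      simp only [List.foldl_cons, List.foldl_map, List.getD_cons_zero, List.zip_cons_cons]
      have : ∀ (c : PySem.Dict String Int) (i : Nat),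
          c.insert ((w :: ws).getD (Nat.succ i) "") ((m :: ms).getD (Nat.succ i) 0)
            = c.insert (ws.getD i "") (ms.getD i 0) := by intro c i; rfl
      simp only [this]
      exact ih ms (d.insert w m) (by simpa using h)

theorem counterA_eq (want : List String) (number : List Int)
    (h : want.length ≤ number.length) :
    (PySem.List.pyRange 0 (want.length : Int)).foldl
      (fun c i => c.insert (PySem.List.pyGetD want i "") (PySem.List.pyGetD number i 0))
      PySem.Dict.empty = altTarget want number := by
  unfold altTarget
  rw [PySem.List.pyRange_zero_natCast, List.foldl_map]
  simp only [PySem.List.pyGetD_natCast]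
  exact foldIdx want number PySem.Dict.empty h

theorem tval_eq_zero (want : List String) (number : List Int) (k : String)
    (hk : k ∉ want) : tval want number k = 0 := by
  unfold tval
  apply PySem.Dict.getD_of_not_contains
  apply contains_false_of_not_mem
  rw [altTarget_keys, PySem.Set.mem_ofList]
  intro hmem
  rcases List.mem_map.mp hmem with ⟨p, hp, hfst⟩
  exact hk (hfst ▸ (List.of_mem_zip hp).1)

theorem predA_iff_mism (want : List String) (number : List Int) (discount : List String) (j : Nat) :
    (counterEqPy (altTarget want number)
        (PySem.Dict.counter ((discount.drop j).take 10)) = true)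
      ↔ mism want number discount j = 0 := by
  rw [counterEqPy_iff]
  unfold mism
  rw [List.countP_eq_zero]
  constructor
  · intro hall k _
    have := hall k
    rw [PySem.Dict.getD_counter] at this
    simp [wcnt, tval, this]
  · intro hz k
    rw [PySem.Dict.getD_counter]
    by_cases hkK : k ∈ keysK want discount
    · have := hz k hkK
      simp only [Bool.not_eq_true', Bool.not_eq_false, beq_iff_eq] at this
      rw [show (altTarget want number).getD k 0 = tval want number k from rfl, ← this]
      rfl
    · rw [keysK, PySem.Set.mem_union, PySem.Set.mem_ofList, PySem.Set.mem_ofList] at hkK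
      push Not at hkK
      have h1 : tval want number k = 0 := tval_eq_zero want number k hkK.1
      have h2 : ((discount.drop j).take 10).count k = 0 := by
        rw [List.count_eq_zero]
        intro hm
        exact hkK.2 ((List.drop_sublist j discount).mem ((List.take_sublist 10 _).mem hm))
      unfold tval at h1
      rw [h1, h2]
      rfl

theorem countP_update (K : List String) (hnd : K.Nodup) (o : String) (ho : o ∈ K)
    (f g : String → Bool) (hfg : ∀ k, k ≠ o → f k = g k) :
    (K.countP g : Int) =
      (K.countP f : Int) + (if g o then 1 else 0) - (if f o then 1 else 0) := by
  induction K with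
  | nil => simp at ho
  | cons x K' ih =>
    rw [List.nodup_cons] at hnd
    rcases List.mem_cons.mp ho with rfl | ho'
    · have hK' : K'.countP g = K'.countP f :=
        List.countP_congr (fun k hk => by rw [hfg k (fun e => hnd.1 (e ▸ hk))])
      rw [List.countP_cons, List.countP_cons, hK']
      push_cast
      by_cases hf : f o = true <;> by_cases hg : g o = true <;> simp [hf, hg]
    · have hx : f x = g x := hfg x (fun e => by subst e; exact hnd.1 ho')
      rw [List.countP_cons, List.countP_cons, ← hx]
      push_cast
      have := ih hnd.2 ho'
      by_cases hf : f x = true <;> simp [hf] <;> omega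

theorem wcnt_succ (discount : List String) (j : Nat) (h : j + 10 < discount.length) (k : String) :
    wcnt discount (j + 1) k =
      wcnt discount j k
        - (if discount[j]'(by omega) = k then 1 else 0)
        + (if discount[j + 10]'h = k then 1 else 0) := by
  unfold wcnt
  have hdrop : discount.drop j = discount[j]'(by omega) :: discount.drop (j + 1) :=
    List.drop_eq_getElem_cons (by omega)
  have htake : (discount.drop (j+1)).take 10 =
      (discount.drop (j+1)).take 9 ++ [discount[j + 10]'h] := by
    have hsome : (discount.drop (j+1))[9]? = some (discount[j + 10]'h) := by
      rw [List.getElem?_drop]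
      exact List.getElem?_eq_getElem (by omega)
    have e9 : (10:Nat) = 9 + 1 := rfl
    conv_lhs => rw [e9]
    rw [List.take_add_one, hsome]
    rfl
  rw [htake, hdrop]
  have h10 : ((discount[j]'(by omega) :: discount.drop (j + 1)).take 10)
      = discount[j]'(by omega) :: (discount.drop (j+1)).take 9 := rfl
  rw [h10, List.count_cons, List.count_append]
  simp only [List.count_singleton]
  push_cast
  by_cases h1 : discount[j]'(by omega) = k <;> by_cases h2 : discount[j+10]'h = k <;>
    simp [h1, h2, beq_iff_eq]

theorem step_slide (want : List String) (number : List Int) (discount : List String)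
    (j : Nat) (hA : j + 10 < discount.length)
    (w : PySem.Dict String Int) (hw : ∀ k, w.getD k 0 = wcnt discount j k) (c : Int) :
    ∃ w' : PySem.Dict String Int,
      altStep (altTarget want number) (discount.length : Int) discount
          (w, (mism want number discount j : Int), c) (j : Int)
        = (w', (mism want number discount (j + 1) : Int),
            if (mism want number discount j : Int) = 0 then c + 1 else c)
      ∧ ∀ k, w'.getD k 0 = wcnt discount (j + 1) k := by
  have ho : j < discount.length := by omega
  have hoget : PySem.List.pyGetD discount (j : Int) "" = discount[j]'ho := by
    rw [PySem.List.pyGetD_natCast]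
    exact List.getD_eq_getElem _ _ ho
  have heget : PySem.List.pyGetD discount ((j : Int) + 10) "" = discount[j + 10]'hA := by
    have h10 : ((j : Int) + 10) = ((j + 10 : Nat) : Int) := by push_cast; ring
    rw [h10, PySem.List.pyGetD_natCast]
    exact List.getD_eq_getElem _ _ hA
  set o := discount[j]'ho with hodef
  set e := discount[j + 10]'hA with hedef
  set w1 := w.insert o (w.getD o 0 - 1) with hw1def
  set w2 := w1.insert e (w1.getD e 0 + 1) with hw2def
  have hw1 : ∀ k, w1.getD k 0 = if k = o then wcnt discount j o - 1 else wcnt discount j k := by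
    intro k
    rw [hw1def, PySem.Dict.getD_insert, hw o]
    split_ifs <;> simp [hw]
  have hw2g : ∀ k, w2.getD k 0 = wcnt discount (j + 1) k := by
    intro k
    rw [hw2def, PySem.Dict.getD_insert, hw1 e, hw1 k]
    rw [wcnt_succ discount j hA k]
    rw [← hodef, ← hedef]
    by_cases h1 : k = e <;> by_cases h2 : k = o <;> by_cases h3 : e = o <;>
      (first
        | (simp [h1, h2, h3, Ne.symm h3, eq_comm]; try omega)
        | (simp [h1, h2, h3, eq_comm]; try omega))
  refine ⟨w2, ?_, hw2g⟩
  have hcond : ((j : Int) + 10 < (discount.length : Int)) := by exact_mod_cast hA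
  simp only [altStep, hoget, heget, ← hw1def, ← hw2def, if_pos hcond]
  have hKnd : (keysK want discount).Nodup :=
    PySem.Set.nodup_union _ _ (PySem.Set.nodup_ofList _)
  have hoK : o ∈ keysK want discount := by
    rw [keysK, PySem.Set.mem_union, PySem.Set.mem_ofList, PySem.Set.mem_ofList]
    exact Or.inr (List.getElem_mem ho)
  have heK : e ∈ keysK want discount := by
    rw [keysK, PySem.Set.mem_union, PySem.Set.mem_ofList, PySem.Set.mem_ofList]
    exact Or.inr (List.getElem_mem hA)
  set p0 : String → Bool := fun k => !(wcnt discount j k == tval want number k) with hp0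
  set p1 : String → Bool := fun k => !(w1.getD k 0 == tval want number k) with hp1
  set p2 : String → Bool := fun k => !(w2.getD k 0 == tval want number k) with hp2
  have e1 : ((keysK want discount).countP p1 : Int) =
      ((keysK want discount).countP p0 : Int) + (if p1 o then 1 else 0) - (if p0 o then 1 else 0) :=
    countP_update _ hKnd o hoK p0 p1 (fun k hk => by simp [hp0, hp1, hw1 k, hk])
  have e2 : ((keysK want discount).countP p2 : Int) =
      ((keysK want discount).countP p1 : Int) + (if p2 e then 1 else 0) - (if p1 e then 1 else 0) :=
    countP_update _ hKnd e heK p1 p2 (fun k hk => by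
      simp only [hp1, hp2, hw2def, PySem.Dict.getD_insert, if_neg hk])
  have hm0 : (mism want number discount j : Int) = ((keysK want discount).countP p0 : Int) := rfl
  have hm2 : (mism want number discount (j + 1) : Int) = ((keysK want discount).countP p2 : Int) := by
    unfold mism
    congr 1
    exact (List.countP_congr (fun k _ => by simp [hp2, hw2g k])).symm
  refine Prod.ext rfl (Prod.ext ?_ rfl)
  simp only []
  rw [hm2, e2, e1, ← hm0]
  have ho0 : w.getD o 0 = wcnt discount j o := hw o
  have hw1o : w1.getD o 0 = wcnt discount j o - 1 := by rw [hw1 o]; simp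
  have hw1e : w1.getD e 0 = if e = o then wcnt discount j o - 1 else wcnt discount j e := hw1 e
  have hw2e : w2.getD e 0 = w1.getD e 0 + 1 := by rw [hw2def, PySem.Dict.getD_insert]; simp
  simp only [hp0, hp1, hp2, ho0, hw1o, hw2e, hw1e,
    show ∀ k, (altTarget want number).getD k 0 = tval want number k from fun _ => rfl]
  by_cases h3 : e = o <;>
    simp only [h3, Bool.not_eq_true', beq_eq_false_iff_ne, beq_iff_eq, ne_eq] <;>
      split_ifs <;> omega

theorem main_invariant (want : List String) (number : List Int) (discount : List String)
    (w0 : PySem.Dict String Int) (hw0 : ∀ k, w0.getD k 0 = wcnt discount 0 k)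
    (j : Nat) (hj : j ≤ discount.length - 9) :
    ∃ w : PySem.Dict String Int, ∃ b : Int,
      ((List.range j).map (fun i : Nat => (i : Int))).foldl
          (altStep (altTarget want number) (discount.length : Int) discount)
          (w0, (mism want number discount 0 : Int), 0)
        = (w, b, ((List.range j).countP (fun i => mism want number discount i == 0) : Int))
      ∧ (j < discount.length - 9 →
          (∀ k, w.getD k 0 = wcnt discount j k) ∧ b = (mism want number discount j : Int)) := by
  induction j with
  | zero => exact ⟨w0, (mism want number discount 0 : Int), by simp, fun _ => ⟨hw0, rfl⟩⟩
  | succ j ih =>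
    have hjlt : j < discount.length - 9 := by omega
    obtain ⟨w, b, heq, hcond⟩ := ih (by omega)
    obtain ⟨hw, hb⟩ := hcond hjlt
    rw [List.range_succ, List.map_append, List.foldl_append, heq]
    simp only [List.map_cons, List.map_nil, List.foldl_cons, List.foldl_nil]
    have hcnt : (((List.range j ++ [j]).countP (fun i => mism want number discount i == 0) : Nat) : Int)
        = (((List.range j).countP (fun i => mism want number discount i == 0) : Nat) : Int)
          + (if (mism want number discount j : Int) = 0 then 1 else 0) := by
      rw [List.countP_append]
      push_cast
      by_cases hmz : mism want number discount j = 0 <;> simp [hmz]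
    by_cases hA : j + 10 < discount.length
    · obtain ⟨w', hstep, hw'⟩ := step_slide want number discount j hA w hw
        ((List.range j).countP (fun i => mism want number discount i == 0) : Int)
      rw [hb, hstep]
      refine ⟨w', (mism want number discount (j+1) : Int), ?_, fun _ => ⟨hw', rfl⟩⟩
      rw [hcnt]
      split_ifs <;> rfl
    · have hcondF : ¬ ((j : Int) + 10 < (discount.length : Int)) := by omega
      refine ⟨w, b, ?_, fun hlt => absurd hlt (by omega)⟩
      simp only [altStep, if_neg hcondF]
      rw [hb, hcnt]
      split_ifs <;> rfl

-- ===== VERDICT (by name: the statement is the Claim_ definition above) =====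
theorem solution_spec : Claim_equal_solution := by
  intro want number discount _ hpre
  unfold Pre_solution at hpre
  unfold Spec_solution
  simp only [solution, solution_alt]
  rw [counterA_eq want number hpre]
  by_cases hn : (discount.length : Int) < 10
  · have hr : PySem.List.pyRange 0 ((discount.length : Int) - 10 + 1) = [] := by
      rw [List.eq_nil_iff_forall_not_mem]
      intro x hx
      rw [PySem.List.mem_pyRange_one] at hx
      omega
    rw [hr, if_pos hn]
    rfl
  · rw [if_neg hn]
    have hn' : 10 ≤ discount.length := by
      rw [not_lt] at hn
      exact_mod_cast hn
    set m := discount.length - 9 with hm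
    have hstop : (discount.length : Int) - 10 + 1 = ((m : Nat) : Int) := by
      rw [hm]
      omega
    rw [hstop, PySem.List.pyRange_zero_natCast]
    -- the initial window counts
    have hw0 : ∀ k, ((PySem.List.slice discount none (some 10)).foldl
        (fun d x => d.insert x (d.getD x 0 + 1)) PySem.Dict.empty).getD k 0 = wcnt discount 0 k := by
      intro k
      rw [PySem.Dict.getD_foldl_insert_add_one, PySem.List.slice_to discount (by norm_num)]
      unfold wcnt
      rw [List.drop_zero]
      simp
    -- the initial mismatch count
    have hbad0 : (PySem.Set.union (PySem.Set.ofList want) (PySem.Set.ofList discount)).foldl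
        (fun b k => if ((PySem.List.slice discount none (some 10)).foldl
            (fun d x => d.insert x (d.getD x 0 + 1)) PySem.Dict.empty).getD k 0
              != (altTarget want number).getD k 0 then b + 1 else b) (0 : Int)
        = (mism want number discount 0 : Int) := by
      rw [PySem.List.foldl_if_add_one]
      rw [zero_add]
      unfold mism keysK
      norm_cast
      apply List.countP_congr
      intro k _
      rw [hw0 k]
      rfl
    rw [hbad0]
    obtain ⟨w, b, heq, -⟩ := main_invariant want number discount _ hw0 m (le_refl m)
    rw [heq]
    -- A's loop is a countP over the same range
    rw [PySem.List.foldl_if_add_one, zero_add, List.countP_map]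
    congr 1
    apply List.countP_congr
    intro i _
    have hslice : PySem.List.slice discount (some (i : Int)) (some (10 + (i : Int)))
        = (discount.drop i).take 10 := by
      have h10 : (10 + (i : Int)) = ((i + 10 : Nat) : Int) := by push_cast; ring
      rw [h10, PySem.List.slice_natCast]
      congr 1
      omega
    simp only [Function.comp]
    rw [hslice]
    constructor
    · intro hp
      have := (predA_iff_mism want number discount i).mp hp
      simp [this]
    · intro hq
      refine (predA_iff_mism want number discount i).mpr ?_
      simpa using hq
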